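-- pv_equiv track=rewrite | github.com/doingandlearning/altusPythonWorkshops1 | 1-functional-programming/exercise2-student.py | sentiment_analysis
-- ===== SOURCE A (Python) =====
-- import string
--
-- def sentiment_analysis(review):
--     text = review.get("review")
--     text = text.translate(str.maketrans('', '', string.punctuation)).lower()
--     good_words = ["powerfull", "good", "memorable", "great"]
--     bad_words = ["disappointing", "falls", ]
--     textarr = text.split(" ")
--     sentiment_score = 0
--     for word in textarr:
--         if word in good_words:
--             sentiment_score += 1
--         elif word in bad_words:
--             sentiment_score -= 1
--
--     if sentiment_score >= 1:
--         return "positive"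
--     elif sentiment_score == 0:
--         return "neutral"
--     else:
--         return "negative"
-- ===== SOURCE B (Python) =====
-- import string
--
-- def sentiment_analysis(review):
--     text = review.get("review")
--     text = text.translate(str.maketrans('', '', string.punctuation)).lower()
--     counts = {}
--     for word in text.split(" "):
--         counts[word] = counts.get(word, 0) + 1
--     good_words = ["powerfull", "good", "memorable", "great"]
--     bad_words = ["disappointing", "falls"]
--     sentiment_score = sum(counts.get(g, 0) for g in good_words) \
--         - sum(counts.get(b, 0) for b in bad_words)
--     if sentiment_score >= 1:
--         return "positive"
--     if sentiment_score == 0: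
--         return "neutral"
--     return "negative"
-- ===== Notes on version B (the rewrite author's own statement) =====
-- stated objective: alternative
-- what changed: B builds a frequency table of the review words once and computes the score by iterating over the fixed good/bad vocabularies, adding/subtracting table counts, instead of scanning the words with if/elif branches over the vocab lists.
import Mathlib
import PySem

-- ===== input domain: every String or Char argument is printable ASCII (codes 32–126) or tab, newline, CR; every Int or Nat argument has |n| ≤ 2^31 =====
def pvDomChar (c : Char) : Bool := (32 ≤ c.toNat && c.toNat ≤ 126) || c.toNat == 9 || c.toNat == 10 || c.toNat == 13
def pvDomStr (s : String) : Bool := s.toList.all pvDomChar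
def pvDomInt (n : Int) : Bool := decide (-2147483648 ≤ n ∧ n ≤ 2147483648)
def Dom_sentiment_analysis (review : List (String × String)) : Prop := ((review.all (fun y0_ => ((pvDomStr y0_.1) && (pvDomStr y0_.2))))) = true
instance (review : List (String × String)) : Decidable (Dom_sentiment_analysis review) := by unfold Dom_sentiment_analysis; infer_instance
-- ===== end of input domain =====

-- B replaces A's per-word if/elif scan by a frequency table plus a loop over the fixed vocabularies (alternative decomposition; return value only).


-- shared preprocessing (identical lines in both Pythons): get the text, strip punctuation, lowercase, split on " "
-- string.punctuation, 32 ASCII chars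
def pvPunct : List Char := "!\"#$%&'()*+,-./:;<=>?@[\\]^_`{|}~".toList

def pvWords (review : List (String × String)) : List (List Char) :=
  -- review.get("review"); Pre_ guarantees the key is present (otherwise Python raises AttributeError on None)
  let text := ((PySem.Dict.mk review).get? "review").getD ""
  -- text.translate(str.maketrans('', '', string.punctuation)): exact — deletes exactly the chars of string.punctuation
  let cs := text.toList.filter (fun c => !(pvPunct.contains c))
  PySem.Chars.splitOn (PySem.Chars.lower cs) [' ']

def pvGood : List (List Char) := ["powerfull".toList, "good".toList, "memorable".toList, "great".toList]
def pvBad : List (List Char) := ["disappointing".toList, "falls".toList]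

-- ===== PORT A =====
def sentiment_analysis (review : List (String × String)) : String :=
  let score := (pvWords review).foldl
    (fun s w => if pvGood.contains w then s + 1 else if pvBad.contains w then s - 1 else s) (0 : Int)
  if score ≥ 1 then "positive" else if score = 0 then "neutral" else "negative"

-- ===== PORT B =====
def sentiment_analysis_alt (review : List (String × String)) : String :=
  let counts := (pvWords review).foldl (fun d w => d.insert w (d.getD w 0 + 1)) PySem.Dict.empty
  let score := pvGood.foldl (fun s g => s + counts.getD g 0) (0 : Int)
             - pvBad.foldl (fun s b => s + counts.getD b 0) (0 : Int)
  if score ≥ 1 then "positive" else if score = 0 then "neutral" else "negative"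

-- ===== PRECONDITION & SPEC =====
-- Pre_ excludes exactly the dicts without a "review" key, on which A raises AttributeError (None.translate)
def Pre_sentiment_analysis (review : List (String × String)) : Prop :=
  ((PySem.Dict.mk review).get? "review").isSome = true
instance (review : List (String × String)) : Decidable (Pre_sentiment_analysis review) := by unfold Pre_sentiment_analysis; infer_instance
def pvWitness_sentiment_analysis : (List (String × String)) := [("review", "a good one")]

def Spec_sentiment_analysis (review : List (String × String)) (out : String) : Prop := out = sentiment_analysis_alt review
instance (review : List (String × String)) (out : String) : Decidable (Spec_sentiment_analysis review out) := by unfold Spec_sentiment_analysis; infer_instance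

-- ===== CLAIM (what is proved, stated in full; the proofs are below) =====
def Claim_equal_sentiment_analysis : Prop := ∀ (review : List (String × String)), Dom_sentiment_analysis review → Pre_sentiment_analysis review → Spec_sentiment_analysis review (sentiment_analysis review)

-- ===== LEMMAS AND PROOFS =====

-- per-word contribution of A's if/elif branches
def pvF (w : List Char) : Int :=
  if pvGood.contains w then 1 else if pvBad.contains w then -1 else 0

-- count-based tally of a word list (the value both scores equal)
def pvT (ws : List (List Char)) : Int :=
  ((ws.count "powerfull".toList : Int) + ws.count "good".toList + ws.count "memorable".toList
    + ws.count "great".toList) - ((ws.count "disappointing".toList : Int) + ws.count "falls".toList)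

lemma pvT_cons (w : List Char) (ws : List (List Char)) : pvT (w :: ws) = pvT ws + pvF w := by
  by_cases h1 : w = ['p','o','w','e','r','f','u','l','l']
  · subst h1; simp [pvT, pvF, pvGood]; ring
  by_cases h2 : w = ['g','o','o','d']
  · subst h2; simp [pvT, pvF, pvGood]; ring
  by_cases h3 : w = ['m','e','m','o','r','a','b','l','e']
  · subst h3; simp [pvT, pvF, pvGood]; ring
  by_cases h4 : w = ['g','r','e','a','t']
  · subst h4; simp [pvT, pvF, pvGood]; ring
  by_cases h5 : w = ['d','i','s','a','p','p','o','i','n','t','i','n','g']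
  · subst h5; simp [pvT, pvF, pvGood, pvBad]; ring
  by_cases h6 : w = ['f','a','l','l','s']
  · subst h6; simp [pvT, pvF, pvGood, pvBad]; ring
  · simp [pvT, pvF, pvGood, pvBad, h1, h2, h3, h4, h5, h6]

lemma pvFoldA (ws : List (List Char)) : ∀ s : Int,
    ws.foldl (fun s w => if pvGood.contains w then s + 1 else if pvBad.contains w then s - 1 else s) s
      = s + pvT ws := by
  induction ws with
  | nil => intro s; simp [pvT]
  | cons w ws ih =>
      intro s
      have hstep : (if pvGood.contains w then s + 1 else if pvBad.contains w then s - 1 else s) = s + pvF w := by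
        unfold pvF; split_ifs <;> ring
      simp only [List.foldl_cons, hstep, ih, pvT_cons]
      ring

lemma pvScoreB (ws : List (List Char)) :
    pvGood.foldl (fun s g => s + (ws.foldl (fun d w => d.insert w (d.getD w 0 + 1)) PySem.Dict.empty).getD g 0) (0 : Int)
      - pvBad.foldl (fun s b => s + (ws.foldl (fun d w => d.insert w (d.getD w 0 + 1)) PySem.Dict.empty).getD b 0) (0 : Int)
      = pvT ws := by
  simp [pvGood, pvBad, pvT, PySem.Dict.getD_foldl_insert_add_one, PySem.Dict.getD_empty]

-- ===== VERDICT (by name: the statement is the Claim_ definition above) =====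
theorem sentiment_analysis_spec : Claim_equal_sentiment_analysis := by
  intro review _ _
  show _ = _
  simp only [sentiment_analysis, sentiment_analysis_alt]
  rw [pvFoldA, pvScoreB, zero_add]
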